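-- pv_equiv track=rewrite | github.com/eti-p-doray/rootbit | utils.py | GetEquivalentClassSize
-- ===== SOURCE A (Python) =====
-- def GetEquivalentClassSize(value: str, width: int, symmetry_width: int) -> int:
--   if (width == 1):
--     return 1
--   half_width = width // 2
--   left = GetEquivalentClassSize(value[0:half_width], half_width, symmetry_width)
--   if (value[0:half_width] != value[half_width:]):
--     right = GetEquivalentClassSize(value[half_width:], half_width, symmetry_width)
--     if (width <= symmetry_width):
--       return left * right * 2
--     return left * right
--   return left * left
-- ===== SOURCE B (Python) =====
-- def GetEquivalentClassSize(value: str, width: int, symmetry_width: int) -> int: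
--   # The result is always a power of two: each node of the halving tree whose two
--   # halves differ (and whose width is within symmetry_width) doubles the class size.
--   # Count those nodes (with multiplicity m for nodes under equal-halves squarings)
--   # using an explicit worklist, and return 2**count.
--   exp = 0
--   stack = [(value, width, 1)]
--   while stack:
--     s, w, m = stack.pop()
--     if w == 1:
--       continue
--     h = w // 2
--     a, b = s[0:h], s[h:]
--     if a == b:
--       stack.append((a, h, 2 * m))
--     else:
--       if w <= symmetry_width:
--         exp += m
--       stack.append((a, h, m))
--       stack.append((b, h, m))
--   return 2 ** exp
-- ===== Notes on version B (the rewrite author's own statement) =====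
-- stated objective: alternative
-- what changed: B replaces A's recursive multiplication of half-results by the observation that the result is always a power of two: an iterative explicit-stack worklist counts (with a multiplicity that doubles under equal-halves squarings) the halving-tree nodes whose two halves differ and have width <= symmetry_width, and returns 2**count.
import Mathlib
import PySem

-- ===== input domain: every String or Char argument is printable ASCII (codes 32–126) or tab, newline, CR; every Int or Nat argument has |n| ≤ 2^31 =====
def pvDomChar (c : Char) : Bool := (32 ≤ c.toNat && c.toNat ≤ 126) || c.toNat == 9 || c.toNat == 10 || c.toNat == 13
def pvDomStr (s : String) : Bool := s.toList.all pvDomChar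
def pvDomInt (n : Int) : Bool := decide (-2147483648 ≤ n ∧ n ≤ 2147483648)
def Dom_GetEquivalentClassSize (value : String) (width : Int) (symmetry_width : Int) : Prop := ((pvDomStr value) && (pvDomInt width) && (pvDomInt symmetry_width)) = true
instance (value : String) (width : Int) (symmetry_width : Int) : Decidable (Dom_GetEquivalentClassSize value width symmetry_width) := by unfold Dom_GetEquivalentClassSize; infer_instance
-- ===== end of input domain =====

-- B replaces A's recursive product of halves by an iterative worklist that counts the
-- doubling nodes and returns 2**count (objective: alternative/simpler mechanism).

-- ===== PORT A =====
-- A's recursion halves `width`; for width ≤ 0 the Python recursion never terminates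
-- (RecursionError), so the port carries fuel = width.toNat + 1, which is sufficient
-- whenever 1 ≤ width (the precondition); the fuel-out value 0 is never reached on Pre_.
def pvGoA (fuel : Nat) (value : List Char) (width symmetry_width : Int) : Int :=
  match fuel with
  | 0 => 0
  | fuel + 1 =>
    if width = 1 then 1
    else
      let half_width := PySem.Int.floordiv width 2
      let lhs := PySem.List.slice value (some 0) (some half_width)
      let rhs := PySem.List.slice value (some half_width) none
      let left := pvGoA fuel lhs half_width symmetry_width
      if lhs ≠ rhs then
        let right := pvGoA fuel rhs half_width symmetry_width
        if width ≤ symmetry_width then left * right * 2 else left * right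
      else left * left

def GetEquivalentClassSize (value : String) (width : Int) (symmetry_width : Int) : Int :=
  pvGoA (width.toNat + 1) value.toList width symmetry_width

-- ===== PORT B =====
theorem pv_half_lt (w : Int) (h : ¬ w ≤ 1) : (PySem.Int.floordiv w 2).toNat < w.toNat := by
  rw [PySem.Int.floordiv_eq_ediv_of_pos (by omega)]
  omega

-- fuel device for the port of Source B's while-loop: the exact number of loop
-- iterations on a node of width w (1 when 1 ≤ w ≤ 1; for width ≤ 0 the Python
-- loop never terminates, like A, and the fuel-out value is never claimed).
def pvT (v : List Char) (w : Int) : Nat :=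
  if _h : w ≤ 1 then 1
  else if PySem.List.slice v (some 0) (some (PySem.Int.floordiv w 2)) =
          PySem.List.slice v (some (PySem.Int.floordiv w 2)) none then
    1 + pvT (PySem.List.slice v (some 0) (some (PySem.Int.floordiv w 2))) (PySem.Int.floordiv w 2)
  else
    1 + pvT (PySem.List.slice v (some 0) (some (PySem.Int.floordiv w 2))) (PySem.Int.floordiv w 2)
      + pvT (PySem.List.slice v (some (PySem.Int.floordiv w 2)) none) (PySem.Int.floordiv w 2)
termination_by w.toNat
decreasing_by all_goals exact pv_half_lt w _h

-- Transliteration of Source B's while-loop over the explicit stack of (segment, width,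
-- multiplicity); fuel = pvT bounds the iteration count.
def pvGoB (fuel : Nat) (stack : List (List Char × Int × Int)) (symmetry_width : Int) (exp : Int) : Int :=
  match fuel, stack with
  | _, [] => 2 ^ exp.toNat
  | 0, _ :: _ => 2 ^ exp.toNat
  | fuel + 1, (s, w, m) :: rest =>
    if w = 1 then pvGoB fuel rest symmetry_width exp
    else
      let h := PySem.Int.floordiv w 2
      let a := PySem.List.slice s (some 0) (some h)
      let b := PySem.List.slice s (some h) none
      if a = b then
        pvGoB fuel ((a, h, 2 * m) :: rest) symmetry_width exp
      else if w ≤ symmetry_width then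
        pvGoB fuel ((b, h, m) :: (a, h, m) :: rest) symmetry_width (exp + m)
      else
        pvGoB fuel ((b, h, m) :: (a, h, m) :: rest) symmetry_width exp

def GetEquivalentClassSize_alt (value : String) (width : Int) (symmetry_width : Int) : Int :=
  pvGoB (pvT value.toList width) [(value.toList, width, 1)] symmetry_width 0

-- ===== PRECONDITION & SPEC =====
-- Pre_ excludes width ≤ 0, on which Python A recurses forever (RecursionError) and B loops forever.
def Pre_GetEquivalentClassSize (value : String) (width : Int) (symmetry_width : Int) : Prop :=
  1 ≤ width
instance (value : String) (width : Int) (symmetry_width : Int) : Decidable (Pre_GetEquivalentClassSize value width symmetry_width) := by unfold Pre_GetEquivalentClassSize; infer_instance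

def pvWitness_GetEquivalentClassSize : String × Int × Int := ("abab", 4, 4)

def Spec_GetEquivalentClassSize (value : String) (width : Int) (symmetry_width : Int) (out : Int) : Prop := out = GetEquivalentClassSize_alt value width symmetry_width
instance (value : String) (width : Int) (symmetry_width : Int) (out : Int) : Decidable (Spec_GetEquivalentClassSize value width symmetry_width out) := by unfold Spec_GetEquivalentClassSize; infer_instance

-- ===== CLAIM (what is proved, stated in full; the proofs are below) =====
def Claim_equal_GetEquivalentClassSize : Prop := ∀ (value : String) (width : Int) (symmetry_width : Int), Dom_GetEquivalentClassSize value width symmetry_width → Pre_GetEquivalentClassSize value width symmetry_width → Spec_GetEquivalentClassSize value width symmetry_width (GetEquivalentClassSize value width symmetry_width)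

-- ===== LEMMAS AND PROOFS =====

-- exponent of the (power-of-two) result of A on widths ≥ 1
def pvE (value : List Char) (width symmetry_width : Int) : Nat :=
  if _h : width ≤ 1 then 0
  else if PySem.List.slice value (some 0) (some (PySem.Int.floordiv width 2)) =
          PySem.List.slice value (some (PySem.Int.floordiv width 2)) none then
    2 * pvE (PySem.List.slice value (some 0) (some (PySem.Int.floordiv width 2)))
        (PySem.Int.floordiv width 2) symmetry_width
  else
    pvE (PySem.List.slice value (some 0) (some (PySem.Int.floordiv width 2)))
        (PySem.Int.floordiv width 2) symmetry_width +
    pvE (PySem.List.slice value (some (PySem.Int.floordiv width 2)) none)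
        (PySem.Int.floordiv width 2) symmetry_width +
    (if width ≤ symmetry_width then 1 else 0)
termination_by width.toNat
decreasing_by all_goals exact pv_half_lt width _h

theorem pvE_of_gt (v : List Char) (w s : Int) (h : ¬ w ≤ 1) :
    pvE v w s =
      if PySem.List.slice v (some 0) (some (PySem.Int.floordiv w 2)) =
          PySem.List.slice v (some (PySem.Int.floordiv w 2)) none then
        2 * pvE (PySem.List.slice v (some 0) (some (PySem.Int.floordiv w 2)))
            (PySem.Int.floordiv w 2) s
      else
        pvE (PySem.List.slice v (some 0) (some (PySem.Int.floordiv w 2)))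
            (PySem.Int.floordiv w 2) s +
        pvE (PySem.List.slice v (some (PySem.Int.floordiv w 2)) none)
            (PySem.Int.floordiv w 2) s +
        (if w ≤ s then 1 else 0) := by
  rw [pvE, dif_neg h]

theorem pvE_one (v : List Char) (s : Int) : pvE v 1 s = 0 := by
  rw [pvE, dif_pos (by omega)]

theorem pvT_of_gt (v : List Char) (w : Int) (h : ¬ w ≤ 1) :
    pvT v w =
      if PySem.List.slice v (some 0) (some (PySem.Int.floordiv w 2)) =
          PySem.List.slice v (some (PySem.Int.floordiv w 2)) none then
        1 + pvT (PySem.List.slice v (some 0) (some (PySem.Int.floordiv w 2))) (PySem.Int.floordiv w 2)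
      else
        1 + pvT (PySem.List.slice v (some 0) (some (PySem.Int.floordiv w 2))) (PySem.Int.floordiv w 2)
          + pvT (PySem.List.slice v (some (PySem.Int.floordiv w 2)) none) (PySem.Int.floordiv w 2) := by
  rw [pvT, dif_neg h]

theorem pvT_pos (v : List Char) (w : Int) : 1 ≤ pvT v w := by
  rw [pvT]
  split
  · omega
  · split <;> omega

theorem pv_half_facts (w : Int) (h : ¬ w ≤ 1) :
    1 ≤ PySem.Int.floordiv w 2 ∧ 2 * (PySem.Int.floordiv w 2).toNat ≤ w.toNat := by
  rw [PySem.Int.floordiv_eq_ediv_of_pos (by omega)]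
  omega

theorem pvGoA_eq_pow (fuel : Nat) : ∀ (v : List Char) (w s : Int), 1 ≤ w → w.toNat < fuel →
    pvGoA fuel v w s = 2 ^ pvE v w s := by
  induction fuel with
  | zero => intro v w s h1 h2; omega
  | succ fuel ih =>
    intro v w s h1 h2
    by_cases hw1 : w = 1
    · subst hw1
      simp [pvGoA, pvE]
    · have hgt : ¬ w ≤ 1 := by omega
      obtain ⟨hh1, _⟩ := pv_half_facts w hgt
      have hlt : (PySem.Int.floordiv w 2).toNat < fuel := by
        have := pv_half_lt w hgt; omega
      rw [pvE_of_gt v w s hgt]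
      simp only [pvGoA, if_neg hw1]
      set hw := PySem.Int.floordiv w 2 with hhw
      set a := PySem.List.slice v (some 0) (some hw) with ha
      set b := PySem.List.slice v (some hw) none with hb
      by_cases hab : a = b
      · rw [if_neg (not_not_intro hab), if_pos hab, ih a hw s hh1 hlt, two_mul, pow_add]
      · rw [if_pos hab, if_neg hab, ih a hw s hh1 hlt, ih b hw s hh1 hlt]
        by_cases hs : w ≤ s
        · rw [if_pos hs, if_pos hs, pow_succ, pow_add]
        · rw [if_neg hs, if_neg hs, Nat.add_zero, pow_add]

-- stack-sums of (multiplicity-weighted) exponents and of iteration counts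
def pvStackE (stack : List (List Char × Int × Int)) (s : Int) : Nat :=
  (stack.map (fun p => p.2.2.toNat * pvE p.1 p.2.1 s)).sum
def pvStackT (stack : List (List Char × Int × Int)) : Nat :=
  (stack.map (fun p => pvT p.1 p.2.1)).sum

theorem pvStackE_nil (s : Int) : pvStackE [] s = 0 := rfl
theorem pvStackE_cons (v : List Char) (w m : Int) (rest : List (List Char × Int × Int)) (s : Int) :
    pvStackE ((v, w, m) :: rest) s = m.toNat * pvE v w s + pvStackE rest s := by
  simp [pvStackE]
theorem pvStackT_nil : pvStackT [] = 0 := rfl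
theorem pvStackT_cons (v : List Char) (w m : Int) (rest : List (List Char × Int × Int)) :
    pvStackT ((v, w, m) :: rest) = pvT v w + pvStackT rest := by
  simp [pvStackT]

theorem pvGoB_eq_pow (fuel : Nat) : ∀ (stack : List (List Char × Int × Int)) (s exp : Int),
    0 ≤ exp → (∀ p ∈ stack, 1 ≤ p.2.1 ∧ 0 ≤ p.2.2) → pvStackT stack ≤ fuel →
    pvGoB fuel stack s exp = 2 ^ (exp.toNat + pvStackE stack s) := by
  induction fuel with
  | zero =>
    intro stack s exp he hw hv
    cases stack with
    | nil => simp [pvGoB, pvStackE_nil]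
    | cons p rest =>
      obtain ⟨v, w, m⟩ := p
      exfalso
      have h1 := pvT_pos v w
      rw [pvStackT_cons] at hv
      omega
  | succ fuel ih =>
    intro stack s exp he hw hv
    cases stack with
    | nil => simp [pvGoB, pvStackE_nil]
    | cons p rest =>
      obtain ⟨v, w, m⟩ := p
      have hw1 : 1 ≤ w := (hw (v, w, m) (by simp)).1
      have hm0 : 0 ≤ m := (hw (v, w, m) (by simp)).2
      have hwrest : ∀ p ∈ rest, 1 ≤ p.2.1 ∧ 0 ≤ p.2.2 := fun p hp => hw p (by simp [hp])
      rw [pvStackT_cons] at hv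
      by_cases hone : w = 1
      · subst hone
        rw [pvGoB]
        rw [if_pos rfl]
        rw [ih rest s exp he hwrest (by have := pvT_pos v 1; omega)]
        rw [pvStackE_cons]
        simp [pvE_one]
      · have hgt : ¬ w ≤ 1 := by omega
        obtain ⟨hh1, _⟩ := pv_half_facts w hgt
        have hTw := pvT_of_gt v w hgt
        rw [pvGoB]
        simp only [if_neg hone]
        set hwd := PySem.Int.floordiv w 2 with hhwd
        set a := PySem.List.slice v (some 0) (some hwd) with ha
        set b := PySem.List.slice v (some hwd) none with hb
        have hEw : pvE v w s = if a = b then 2 * pvE a hwd s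
            else pvE a hwd s + pvE b hwd s + (if w ≤ s then 1 else 0) := pvE_of_gt v w s hgt
        by_cases hab : a = b
        · rw [if_pos hab]
          rw [if_pos hab] at hTw
          rw [ih ((a, hwd, 2 * m) :: rest) s exp he
              (by intro p hp
                  simp only [List.mem_cons] at hp
                  rcases hp with rfl | hp
                  · exact ⟨hh1, by show (0:Int) ≤ 2 * m; omega⟩
                  · exact hwrest p hp)
              (by rw [pvStackT_cons]; omega)]
          rw [pvStackE_cons, pvStackE_cons, hEw, if_pos hab]
          have h2m : (2 * m).toNat = 2 * m.toNat := by omega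
          congr 1
          rw [h2m]
          ring
        · rw [if_neg hab]
          rw [if_neg hab] at hTw
          have hpush : ∀ p ∈ ((b, hwd, m) :: (a, hwd, m) :: rest), 1 ≤ p.2.1 ∧ 0 ≤ p.2.2 := by
            intro p hp
            simp only [List.mem_cons] at hp
            rcases hp with rfl | rfl | hp
            · exact ⟨hh1, hm0⟩
            · exact ⟨hh1, hm0⟩
            · exact hwrest p hp
          have hTp : pvStackT ((b, hwd, m) :: (a, hwd, m) :: rest) ≤ fuel := by
            rw [pvStackT_cons, pvStackT_cons]; omega
          by_cases hs : w ≤ s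
          · rw [if_pos hs]
            rw [ih ((b, hwd, m) :: (a, hwd, m) :: rest) s (exp + m) (by omega) hpush hTp]
            rw [pvStackE_cons, pvStackE_cons, pvStackE_cons, hEw, if_neg hab, if_pos hs]
            have hexp : (exp + m).toNat = exp.toNat + m.toNat := by omega
            congr 1
            rw [hexp]
            ring
          · rw [if_neg hs]
            rw [ih ((b, hwd, m) :: (a, hwd, m) :: rest) s exp he hpush hTp]
            rw [pvStackE_cons, pvStackE_cons, pvStackE_cons, hEw, if_neg hab, if_neg hs]
            congr 1
            ring

-- ===== VERDICT (by name: the statement is the Claim_ definition above) =====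
theorem GetEquivalentClassSize_spec : Claim_equal_GetEquivalentClassSize := by
  intro value width symmetry_width _ hpre
  unfold Spec_GetEquivalentClassSize GetEquivalentClassSize GetEquivalentClassSize_alt
  have hpre' : (1 : Int) ≤ width := hpre
  rw [pvGoA_eq_pow (width.toNat + 1) value.toList width symmetry_width hpre' (by omega)]
  rw [pvGoB_eq_pow (pvT value.toList width) [(value.toList, width, 1)] symmetry_width 0 (by omega)
      (by intro p hp; simp at hp; subst hp
          exact ⟨hpre', by show (0:Int) ≤ 1; norm_num⟩)
      (by rw [pvStackT_cons, pvStackT_nil]; omega)]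
  rw [pvStackE_cons, pvStackE_nil]
  norm_num
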